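-- pv_equiv track=rewrite | github.com/LanguageKits/fact-repo | Scripts/Scrapers/basic_scraper.py | merge_open_quotes
-- ===== SOURCE A (Python) =====
-- def merge_open_quotes(data):
--     for i,sentence in enumerate(data):
--         if i < len(data)-1:
--             # odd number of quotes
--             if sentence.count('"') % 2 == 1:
--                 next_sentence=data[i+1]
--                 if next_sentence.count('"') % 2 == 1:
--                     data[i] = sentence+next_sentence
--                     del data[i+1]
--     return data
-- ===== SOURCE B (Python) =====
-- def merge_open_quotes(data):
--     result = []
--     for s in data:
--         if result and result[-1].count('"') % 2 == 1 and s.count('"') % 2 == 1: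
--             result[-1] = result[-1] + s
--         else:
--             result.append(s)
--     data[:] = result
--     return data
-- ===== Notes on version B (the rewrite author's own statement) =====
-- stated objective: simpler
-- what changed: Replaces A's index-based scan that mutates the list in place (set data[i], del data[i+1], lookahead at data[i+1]) with a single left fold into a fresh accumulator that merges each sentence into the accumulator's last element when both have an odd quote count; odd+odd=even guarantees a merged tail is never re-merged, matching A's skip-after-merge.
import Mathlib
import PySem

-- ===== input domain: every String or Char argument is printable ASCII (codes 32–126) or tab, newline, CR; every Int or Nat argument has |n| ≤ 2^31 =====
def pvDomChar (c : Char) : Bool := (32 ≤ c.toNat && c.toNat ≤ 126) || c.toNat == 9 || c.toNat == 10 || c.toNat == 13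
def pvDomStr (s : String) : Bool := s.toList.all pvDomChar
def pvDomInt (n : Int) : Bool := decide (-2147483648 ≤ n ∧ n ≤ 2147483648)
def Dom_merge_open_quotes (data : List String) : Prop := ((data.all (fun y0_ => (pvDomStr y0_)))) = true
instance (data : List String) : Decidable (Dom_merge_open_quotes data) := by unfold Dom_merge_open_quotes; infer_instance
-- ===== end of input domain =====

-- B replaces A's in-place index scan (set/del with lookahead) by a left fold into a fresh
-- accumulator, merging into the accumulator's last element; objective: simpler.
-- A mutates its argument in place; the equivalence proved here is about the RETURN value
-- (Python B performs the same mutation via data[:] = result).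

-- ===== PORT A =====
-- the body of one iteration (the three nested if-statements of A);
-- sentence = data[i], next_sentence = data[i+1], read via getD (always in range when read)
def stepA (i : Nat) (data : List String) : List String :=
  if i < data.length - 1 then
    if PySem.Str.count (data.getD i "") "\"" % 2 == 1 then
      if PySem.Str.count (data.getD (i+1) "") "\"" % 2 == 1 then
        (data.set i (data.getD i "" ++ data.getD (i+1) "")).eraseIdx (i+1)
      else data
    else data
  else data

theorem stepA_length_le (i : Nat) (data : List String) : (stepA i data).length ≤ data.length := by
  unfold stepA
  split_ifs <;> try simp only [List.length_eraseIdx, List.length_set]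
  all_goals first | omega | (split <;> omega)

-- Python's `for i,sentence in enumerate(data)` keeps advancing i over the shrinking list;
-- ported as a loop on the index i with the current list as state.
def mergeLoopA (i : Nat) (data : List String) : List String :=
  if h : i < data.length then
    mergeLoopA (i+1) (stepA i data)
  else data
termination_by data.length - i
decreasing_by
  have := stepA_length_le i data
  omega

def merge_open_quotes (data : List String) : List String := mergeLoopA 0 data

-- ===== PORT B =====
def merge_open_quotes_alt (data : List String) : List String :=
  data.foldl
    (fun result s =>
      if result ≠ [] ∧ PySem.Str.count (result.getLastD "") "\"" % 2 == 1
           ∧ PySem.Str.count s "\"" % 2 == 1 then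
        result.dropLast ++ [result.getLastD "" ++ s]   -- result[-1] = result[-1] + s
      else result ++ [s])
    []

-- ===== PRECONDITION & SPEC =====
def Spec_merge_open_quotes (data : List String) (out : List String) : Prop := out = merge_open_quotes_alt data
instance (data : List String) (out : List String) : Decidable (Spec_merge_open_quotes data out) := by unfold Spec_merge_open_quotes; infer_instance

-- ===== CLAIM (what is proved, stated in full; the proofs are below) =====
def Claim_equal_merge_open_quotes : Prop := ∀ (data : List String), Dom_merge_open_quotes data → Spec_merge_open_quotes data (merge_open_quotes data)

-- ===== LEMMAS AND PROOFS =====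

-- `s.count('"') % 2 == 1` as a Bool, and its characterisation via the char count
def qodd (s : String) : Bool := PySem.Str.count s "\"" % 2 == 1

theorem count_go_single (c : Char) : ∀ (fuel : Nat) (l : List Char) (acc : Nat),
    l.length ≤ fuel → PySem.Chars.count.go [c] fuel l acc = acc + l.count c := by
  intro fuel
  induction fuel with
  | zero =>
    intro l acc h
    have hnil : l = [] := List.eq_nil_of_length_eq_zero (by omega)
    subst hnil; simp [PySem.Chars.count.go]
  | succ n ih =>
    intro l acc h
    cases l with
    | nil => simp [PySem.Chars.count.go]
    | cons x t =>
      simp only [PySem.Chars.count.go]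
      by_cases hx : c = x
      · subst hx
        rw [if_pos (by simp [List.isPrefixOf])]
        simp only [List.length_nil, List.length_cons, List.drop_succ_cons, List.drop_zero]
        rw [ih t (acc + 1) (by simp at h; omega)]
        simp
        omega
      · rw [if_neg (by simp [List.isPrefixOf]; intro hb; exact hx hb)]
        rw [ih t acc (by simp at h; omega)]
        have hxc : ¬ x = c := fun hh => hx hh.symm
        simp [hxc]

theorem count_quote_eq (s : String) : PySem.Str.count s "\"" = s.toList.count '"' := by
  have hq : ("\"" : String).toList = ['"'] := by decide
  simp only [PySem.Str.count, hq, PySem.Chars.count]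
  rw [if_neg (by simp)]
  exact by simpa using count_go_single '"' s.toList.length s.toList 0 le_rfl

theorem qodd_append (a b : String) (ha : qodd a = true) (hb : qodd b = true) :
    qodd (a ++ b) = false := by
  have ha' : a.toList.count '"' % 2 = 1 := by
    unfold qodd at ha; rw [count_quote_eq] at ha; simpa using ha
  have hb' : b.toList.count '"' % 2 = 1 := by
    unfold qodd at hb; rw [count_quote_eq] at hb; simpa using hb
  simp only [qodd, count_quote_eq]
  rw [show (a ++ b).toList = a.toList ++ b.toList from by simp, List.count_append]
  simp only [beq_eq_false_iff_ne, ne_eq]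
  omega

-- the merged result, characterised as a two-at-a-time structural recursion
def mergeF : List String → List String
  | [] => []
  | [x] => [x]
  | x :: y :: rest =>
    if qodd x && qodd y then (x ++ y) :: mergeF rest
    else x :: mergeF (y :: rest)

theorem mergeF_cons_not_odd (x : String) (l : List String) (hx : ¬ qodd x = true) :
    mergeF (x :: l) = x :: mergeF l := by
  cases l with
  | nil => simp [mergeF]
  | cons y t => simp [mergeF, hx]

theorem set_eraseIdx_eq (v : String) : ∀ (i : Nat) (data : List String), i < data.length →
    (data.set i v).eraseIdx (i+1) = data.take i ++ v :: data.drop (i+2) := by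
  intro i
  induction i with
  | zero =>
    intro data h
    cases data with
    | nil => simp at h
    | cons x xs => cases xs <;> simp [List.eraseIdx]
  | succ n ih =>
    intro data h
    cases data with
    | nil => simp at h
    | cons x xs =>
      simp only [List.set, List.eraseIdx, List.take, List.drop, List.cons_append]
      rw [ih xs (by simpa using h)]

-- A's loop from index i leaves data[0:i] alone and computes mergeF on the rest
theorem mergeLoopA_eq : ∀ (i : Nat) (data : List String),
    mergeLoopA i data = data.take i ++ mergeF (data.drop i) := by
  intro i data
  induction i, data using mergeLoopA.induct with
  | case2 i data h =>
    rw [mergeLoopA]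
    simp at h
    simp [List.take_of_length_le h, List.drop_eq_nil_of_le h, mergeF, dif_neg (by omega : ¬ i < data.length)]
  | case1 i data h ih =>
    rw [mergeLoopA]
    simp only [dif_pos h]
    rw [ih]
    have hdrop : data.drop i = data[i] :: data.drop (i+1) := List.drop_eq_getElem_cons h
    by_cases h1 : i < data.length - 1
    · have h2 : i + 1 < data.length := by omega
      have hnext : data.getD (i+1) "" = data[i+1] := by
        simp [List.getD, List.getElem?_eq_getElem h2]
      have hsent : data.getD i "" = data[i] := by
        simp [List.getD, List.getElem?_eq_getElem h]
      have hdrop2 : data.drop (i+1) = data[i+1] :: data.drop (i+2) :=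
        List.drop_eq_getElem_cons h2
      by_cases hs : qodd data[i] = true
      · by_cases hn : qodd data[i+1] = true
        · -- merge branch
          have hs' : (PySem.Str.count data[i] "\"" % 2 == 1) = true := hs
          have hn' : (PySem.Str.count data[i+1] "\"" % 2 == 1) = true := hn
          have hd' : stepA i data = data.take i ++ (data[i] ++ data[i+1]) :: data.drop (i+2) := by
            unfold stepA
            rw [if_pos h1, hsent, hnext, if_pos hs', if_pos hn']
            exact set_eraseIdx_eq _ i data h
          rw [hd']
          have htklen : (data.take i).length = i := by simp [List.length_take]; omega
          have e1 : List.take (i+1) (data.take i) = data.take i := by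
            rw [List.take_take]; simp
          have e2 : List.drop (i+1) (data.take i) = [] :=
            List.drop_eq_nil_of_le (by rw [htklen]; omega)
          rw [List.take_append, List.drop_append, htklen, e1, e2]
          have e3 : i + 1 - i = 1 := by omega
          rw [e3, hdrop, hdrop2]
          simp [mergeF, hs, hn]
        · -- next even: no merge, stepA leaves data unchanged
          have hs' : (PySem.Str.count data[i] "\"" % 2 == 1) = true := hs
          have hn' : ¬ (PySem.Str.count data[i+1] "\"" % 2 == 1) = true := hn
          have hd' : stepA i data = data := by
            unfold stepA
            rw [if_pos h1, hsent, hnext, if_pos hs', if_neg hn']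
          rw [hd', hdrop, hdrop2]
          rw [show mergeF (data[i] :: data[i+1] :: data.drop (i+2))
               = data[i] :: mergeF (data[i+1] :: data.drop (i+2)) from by simp [mergeF, hn]]
          rw [← List.take_append_getElem h, List.append_assoc, List.singleton_append]
      · -- sentence even
        have hs' : ¬ (PySem.Str.count (data.getD i "") "\"" % 2 == 1) = true := by
          rw [hsent]; exact hs
        have hd' : stepA i data = data := by
          unfold stepA
          rw [if_pos h1, if_neg hs']
        rw [hd', hdrop]
        rw [mergeF_cons_not_odd _ _ (by simp [hs])]
        rw [← List.take_append_getElem h, List.append_assoc, List.singleton_append]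
    · -- i = length - 1 : last element
      have hd' : stepA i data = data := by
        unfold stepA
        rw [if_neg h1]
      have hlast : data.drop (i+1) = [] := List.drop_eq_nil_of_le (by omega)
      rw [hd', hdrop, hlast]
      rw [show mergeF ([data[i]] : List String) = [data[i]] from by simp [mergeF],
        show mergeF ([] : List String) = [] from by simp [mergeF]]
      rw [List.append_nil, ← List.take_append_getElem h]

-- B's fold, started from any accumulator whose last element has an even quote count,
-- appends mergeF of the remaining input
theorem foldB_inv : ∀ (n : Nat) (l : List String) (acc : List String), l.length ≤ n →
    (acc = [] ∨ qodd (acc.getLastD "") = false) →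
    l.foldl (fun result s =>
      if result ≠ [] ∧ PySem.Str.count (result.getLastD "") "\"" % 2 == 1
           ∧ PySem.Str.count s "\"" % 2 == 1 then
        result.dropLast ++ [result.getLastD "" ++ s]
      else result ++ [s]) acc = acc ++ mergeF l := by
  intro n
  induction n with
  | zero =>
    intro l acc hl _
    have hnil : l = [] := List.eq_nil_of_length_eq_zero (by omega)
    subst hnil; simp [mergeF]
  | succ m ih =>
    intro l acc hl hacc
    cases l with
    | nil => simp [mergeF]
    | cons x t =>
      have hstep1 :
          (if acc ≠ [] ∧ PySem.Str.count (acc.getLastD "") "\"" % 2 == 1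
               ∧ PySem.Str.count x "\"" % 2 == 1 then
            acc.dropLast ++ [acc.getLastD "" ++ x]
          else acc ++ [x]) = acc ++ [x] := by
        rw [if_neg]
        rintro ⟨h1, h2, -⟩
        rcases hacc with hr | hr
        · exact h1 hr
        · unfold qodd at hr
          exact absurd h2 (by simp only [hr]; simp)
      by_cases hx : qodd x = true
      · cases t with
        | nil =>
          simp only [List.foldl_cons, List.foldl_nil]
          rw [hstep1]; simp [mergeF]
        | cons y u =>
          simp only [List.foldl_cons]
          rw [hstep1]
          have hlastx : (acc ++ [x]).getLastD "" = x := by simp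
          by_cases hy : qodd y = true
          · -- merge x and y
            have hstep2 : (if acc ++ [x] ≠ [] ∧ PySem.Str.count ((acc ++ [x]).getLastD "") "\"" % 2 == 1
                 ∧ PySem.Str.count y "\"" % 2 == 1 then
                (acc ++ [x]).dropLast ++ [(acc ++ [x]).getLastD "" ++ y]
              else acc ++ [x] ++ [y]) = acc ++ [x ++ y] := by
              rw [if_pos ⟨by simp, by rw [hlastx]; exact hx, hy⟩, hlastx]
              simp
            rw [hstep2]
            rw [ih u (acc ++ [x ++ y]) (by simp at hl ⊢; omega)
              (Or.inr (by rw [show (acc ++ [x ++ y]).getLastD "" = x ++ y from by simp]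
                          exact qodd_append x y hx hy))]
            simp [mergeF, hx, hy]
          · -- y even: x stays pending, y cannot merge with it
            have hstep2 : (if acc ++ [x] ≠ [] ∧ PySem.Str.count ((acc ++ [x]).getLastD "") "\"" % 2 == 1
                 ∧ PySem.Str.count y "\"" % 2 == 1 then
                (acc ++ [x]).dropLast ++ [(acc ++ [x]).getLastD "" ++ y]
              else acc ++ [x] ++ [y]) = acc ++ [x] ++ [y] := by
              rw [if_neg]; rintro ⟨-, -, h3⟩
              exact hy (h3 : qodd y = true)
            rw [hstep2]
            rw [ih u (acc ++ [x] ++ [y]) (by simp at hl ⊢; omega)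
              (Or.inr (by rw [show (acc ++ [x] ++ [y]).getLastD "" = y from by simp]
                          exact Bool.eq_false_iff.mpr hy))]
            have hm : mergeF (x :: y :: u) = x :: y :: mergeF u := by
              rw [show mergeF (x :: y :: u) = x :: mergeF (y :: u) from by simp [mergeF, hx, hy]]
              rw [mergeF_cons_not_odd y u hy]
            rw [hm]
            simp
      · -- x even: continue from acc ++ [x]
        simp only [List.foldl_cons]
        rw [hstep1]
        rw [ih t (acc ++ [x]) (by simp at hl ⊢; omega)
          (Or.inr (by rw [show (acc ++ [x]).getLastD "" = x from by simp]
                      exact Bool.eq_false_iff.mpr hx))]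
        rw [mergeF_cons_not_odd x t hx]
        simp

-- ===== VERDICT (by name: the statement is the Claim_ definition above) =====
theorem merge_open_quotes_spec : Claim_equal_merge_open_quotes := by
  intro data _
  show merge_open_quotes data = merge_open_quotes_alt data
  rw [merge_open_quotes, merge_open_quotes_alt, mergeLoopA_eq 0 data,
    foldB_inv data.length data [] le_rfl (Or.inl rfl)]
  simp
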